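-- pv_equiv track=rewrite | github.com/cokkum113/202tooAlgo | hash.py | solution
-- ===== SOURCE A (Python) =====
-- from collections import defaultdict
-- from collections import defaultdict
--
-- def solution(clothes):
--     answer = 1
--     l = defaultdict(int)
--     for i in clothes:
--         l[i[1]] += 1
--         # 30
--
--
--     for i in l:
--         answer *= (l[i] + 1)
--         #30
--     return answer - 1
-- ===== SOURCE B (Python) =====
-- from itertools import groupby
--
-- def solution(clothes):
--     answer = 1
--     for _, group in groupby(sorted(x[1] for x in clothes)):
--         answer *= len(list(group)) + 1
--     return answer - 1
-- ===== Notes on version B (the rewrite author's own statement) =====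
-- stated objective: alternative
-- what changed: Replaces the defaultdict hash-count accumulation and dict-iteration product with a sort-then-groupby scan: the category keys are sorted and each contiguous run's length feeds the product directly.
import Mathlib
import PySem

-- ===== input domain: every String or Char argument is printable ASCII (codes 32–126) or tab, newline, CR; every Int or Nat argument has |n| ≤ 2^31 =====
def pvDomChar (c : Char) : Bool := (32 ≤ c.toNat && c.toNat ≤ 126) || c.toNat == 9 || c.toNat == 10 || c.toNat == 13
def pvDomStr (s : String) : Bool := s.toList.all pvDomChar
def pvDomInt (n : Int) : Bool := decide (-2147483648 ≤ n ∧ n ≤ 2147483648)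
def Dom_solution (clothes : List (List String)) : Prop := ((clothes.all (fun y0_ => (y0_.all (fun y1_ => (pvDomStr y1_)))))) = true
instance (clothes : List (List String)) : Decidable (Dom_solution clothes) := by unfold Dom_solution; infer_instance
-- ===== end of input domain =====

-- B replaces A's defaultdict counting + dict-iteration product by a sort-then-group-runs scan (alternative algorithm, same results).

-- ===== PORT A =====
-- A: count each category i[1] in a defaultdict, then multiply (count+1) over the dict and subtract 1.
def solution (clothes : List (List String)) : Int :=
  let l := clothes.foldl (fun d i => d.modify ((PySem.List.pyGet? i 1).getD "") 0 (· + 1)) PySem.Dict.empty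
  let answer := l.keys.foldl (fun answer k => answer * (l.getD k 0 + 1)) (1 : Int)
  answer - 1

-- ===== PORT B =====
-- groupby on a sorted list of keys: the runs of equal elements, as (element, run length).
def pvRuns : List String → List (String × Nat)
  | [] => []
  | x :: xs => (x, 1 + (xs.takeWhile (· == x)).length) :: pvRuns (xs.dropWhile (· == x))
termination_by l => l.length
decreasing_by
  simpa using Nat.lt_succ_of_le (List.dropWhile_sublist _).length_le

def solution_alt (clothes : List (List String)) : Int :=
  let ks := PySem.List.sorted (clothes.map (fun x => (PySem.List.pyGet? x 1).getD "")) (fun k => k) false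
  let answer := (pvRuns ks).foldl (fun answer g => answer * ((g.2 : Int) + 1)) (1 : Int)
  answer - 1

-- ===== PRECONDITION & SPEC =====
-- Pre_ excludes exactly the inputs where Python A raises IndexError (an item with fewer than 2 entries); B raises there too.
def Pre_solution (clothes : List (List String)) : Prop := ∀ i ∈ clothes, 2 ≤ i.length
instance (clothes : List (List String)) : Decidable (Pre_solution clothes) := by unfold Pre_solution; infer_instance
def pvWitness_solution : List (List String) := [["hat", "headgear"], ["shades", "eyewear"], ["turban", "headgear"]]

def Spec_solution (clothes : List (List String)) (out : Int) : Prop := out = solution_alt clothes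
instance (clothes : List (List String)) (out : Int) : Decidable (Spec_solution clothes out) := by unfold Spec_solution; infer_instance

-- ===== CLAIM (what is proved, stated in full; the proofs are below) =====
def Claim_equal_solution : Prop := ∀ (clothes : List (List String)), Dom_solution clothes → Pre_solution clothes → Spec_solution clothes (solution clothes)

-- ===== LEMMAS AND PROOFS =====

-- a foldl-product over a list is the product of the mapped list
theorem pv_foldl_mul (s : List String) (f : String → Int) :
    s.foldl (fun a k => a * f k) 1 = (s.map f).prod := by
  rw [List.prod_eq_foldl, List.foldl_map]

-- the product of counts+1 over the runs of a sorted list is the product over its Finset of elements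
theorem pvRuns_prod (l : List String) (h : l.Pairwise (· ≤ ·)) :
    ((pvRuns l).map (fun g => ((g.2 : Int) + 1))).prod
      = ∏ k ∈ l.toFinset, ((l.count k : Int) + 1) := by
  induction l using pvRuns.induct with
  | case1 => rw [pvRuns]; simp
  | case2 x xs ih =>
    set t := xs.takeWhile (· == x) with hT
    set d := xs.dropWhile (· == x) with hD
    have hsplit : t ++ d = xs := List.takeWhile_append_dropWhile
    have ht : ∀ y ∈ t, y = x := by
      intro y hy
      simpa using List.mem_takeWhile_imp hy
    have hpw : xs.Pairwise (· ≤ ·) := (List.pairwise_cons.mp h).2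
    have hge : ∀ y ∈ xs, x ≤ y := (List.pairwise_cons.mp h).1
    have hdpw : d.Pairwise (· ≤ ·) := List.Pairwise.sublist (List.dropWhile_sublist _) hpw
    have hxd : x ∉ d := by
      intro hx
      cases hdd : d with
      | nil => rw [hdd] at hx; simp at hx
      | cons z d' =>
        have hz : ¬ z = x := by
          have := List.head_dropWhile_not (fun y => y == x) (l := xs)
          rw [← hD, hdd] at this
          simpa using this (by simp)
        have hzxs : z ∈ xs := (List.dropWhile_sublist _).mem (by rw [← hD, hdd]; simp)
        have hxz : x < z := lt_of_le_of_ne (hge z hzxs) (fun e => hz e.symm)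
        rw [hdd] at hx
        rcases List.mem_cons.mp hx with e | hx'
        · exact hz e.symm
        · have : z ≤ x := (List.pairwise_cons.mp (hdd ▸ hdpw)).1 x hx'
          exact absurd (lt_of_lt_of_le hxz this) (lt_irrefl x)
    have hcx : (x :: xs).count x = 1 + t.length := by
      have h1 : t.count x = t.length := List.count_eq_length.mpr (fun b hb => by simp [ht b hb])
      have h2 : d.count x = 0 := List.count_eq_zero.mpr (fun hx => hxd hx)
      rw [← hsplit]
      simp [List.count_append, h1, h2]
      omega
    have hck : ∀ k, k ≠ x → (x :: xs).count k = d.count k := by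
      intro k hk
      have h1 : t.count k = 0 := List.count_eq_zero.mpr (fun hkt => hk (ht k hkt))
      rw [← hsplit]
      simp [List.count_append, h1, Ne.symm hk]
    have hfin : (x :: xs).toFinset = insert x d.toFinset := by
      ext a
      simp only [List.mem_toFinset, List.mem_cons, Finset.mem_insert, ← hsplit, List.mem_append]
      constructor
      · rintro (e | hat | had)
        · exact Or.inl e
        · exact Or.inl (ht a hat)
        · exact Or.inr had
      · rintro (e | had)
        · exact Or.inl e
        · exact Or.inr (Or.inr had)
    have hxdf : x ∉ d.toFinset := by simpa using hxd
    have hcong : ∀ k ∈ d.toFinset, (((x :: xs).count k : Int) + 1) = ((d.count k : Int) + 1) := by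
      intro k hk
      have hkx : k ≠ x := fun e => hxdf (e ▸ hk)
      rw [hck k hkx]
    rw [pvRuns]
    simp only [List.map_cons, List.prod_cons, ← hT, ← hD]
    rw [ih hdpw, hfin, Finset.prod_insert hxdf, hcx, Finset.prod_congr rfl hcong]

-- a Nodup list with the same members as ks has toFinset ks.toFinset
theorem pv_ofList_toFinset (ks : List String) : (PySem.Set.ofList ks).toFinset = ks.toFinset := by
  ext a
  simp [PySem.Set.mem_ofList]

-- ===== VERDICT (by name: the statement is the Claim_ definition above) =====
theorem solution_spec : Claim_equal_solution := by
  intro clothes _ _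
  unfold Spec_solution solution solution_alt
  have hdict : clothes.foldl (fun d i => d.modify ((PySem.List.pyGet? i 1).getD "") 0 (· + 1))
        (PySem.Dict.empty : PySem.Dict String Int)
      = (clothes.map (fun x => (PySem.List.pyGet? x 1).getD "")).foldl
        (fun d x => d.modify x 0 (· + 1)) (PySem.Dict.empty : PySem.Dict String Int) := by
    rw [List.foldl_map]
  rw [hdict]
  set ks := clothes.map (fun x => (PySem.List.pyGet? x 1).getD "") with hks
  set ss := PySem.List.sorted ks (fun k => k) false with hss
  set dct := ks.foldl (fun d x => d.modify x 0 (· + 1)) (PySem.Dict.empty : PySem.Dict String Int) with hdct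
  have hperm : ss.Perm ks := PySem.List.sorted_perm ks (fun k => k) false
  have hpw : ss.Pairwise (· ≤ ·) := by
    have := PySem.List.sorted_pairwise ks (fun k => k)
    simpa using this
  have hkeys : dct.keys = PySem.Set.ofList ks := by
    rw [hdct]
    have := PySem.Dict.keys_foldl_modify ks (0 : Int) (fun _ _ v => v + 1) PySem.Dict.empty
    simpa [PySem.Set.update_nil_left] using this
  have hgetD : ∀ k, dct.getD k 0 = (ks.count k : Int) := by
    intro k
    rw [hdct]
    have := PySem.Dict.getD_foldl_modify_add_one ks
      (PySem.Dict.empty : PySem.Dict String Int) k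
    simpa using this
  have hA : dct.keys.foldl (fun answer k => answer * (dct.getD k 0 + 1)) (1 : Int)
      = ∏ k ∈ ks.toFinset, ((ks.count k : Int) + 1) := by
    have hfn : (fun (answer : Int) k => answer * (dct.getD k 0 + 1))
        = fun (answer : Int) k => answer * ((ks.count k : Int) + 1) := by
      funext a k; rw [hgetD]
    rw [hkeys, hfn, pv_foldl_mul, ← List.prod_toFinset _ (PySem.Set.nodup_ofList ks),
      pv_ofList_toFinset]
  have hB : (pvRuns ss).foldl (fun answer g => answer * ((g.2 : Int) + 1)) (1 : Int)
      = ∏ k ∈ ks.toFinset, ((ks.count k : Int) + 1) := by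
    have h1 : (pvRuns ss).foldl (fun answer g => answer * ((g.2 : Int) + 1)) (1 : Int)
        = ((pvRuns ss).map (fun g => ((g.2 : Int) + 1))).prod := by
      rw [List.prod_eq_foldl, List.foldl_map]
    rw [h1, pvRuns_prod ss hpw, List.toFinset_eq_of_perm ss ks hperm]
    exact Finset.prod_congr rfl (fun k _ => by rw [hperm.count_eq])
  show dct.keys.foldl (fun answer k => answer * (dct.getD k 0 + 1)) (1 : Int) - 1
      = (pvRuns ss).foldl (fun answer g => answer * ((g.2 : Int) + 1)) (1 : Int) - 1
  rw [hA, hB]
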